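-- pv_equiv track=rewrite | github.com/missionpinball/mpf-ls | mpfls/mpf_ls.py | _get_current_token
-- ===== SOURCE A (Python) =====
-- def _get_current_token(lines, start_position):
--     line = start_position['line']
--     start_character = character = start_position["character"]
--
--     try:
--         current_line = lines[line]
--     except IndexError:
--         # line does not exist
--         return "", {"start": start_position, "end": start_position}
--
--     while character < len(current_line) and current_line[character] not in (" ", ":", ",", "\n"):
--         character += 1
--
--     return current_line[start_character:character],\
--            {"start": start_position, "end": {"line": line, "character": character}}
-- ===== SOURCE B (Python) =====
-- def _get_current_token(lines, start_position):
--     line = start_position['line']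
--     start = start_position['character']
--
--     try:
--         current_line = lines[line]
--     except IndexError:
--         # line does not exist
--         return "", {"start": start_position, "end": start_position}
--
--     hits = [p for p in (current_line.find(d, start) for d in " :,\n") if p != -1]
--     end = min(hits) if hits else max(len(current_line), start)
--     return current_line[start:end], \
--            {"start": start_position, "end": {"line": line, "character": end}}
-- ===== Notes on version B (the rewrite author's own statement) =====
-- stated objective: alternative
-- what changed: Replaces the manual char-by-char while loop with repeated str.find scans for each of the four delimiters plus min over the found positions (defaulting to end-of-line / the cursor when none is found at or after the cursor).
import Mathlib
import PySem

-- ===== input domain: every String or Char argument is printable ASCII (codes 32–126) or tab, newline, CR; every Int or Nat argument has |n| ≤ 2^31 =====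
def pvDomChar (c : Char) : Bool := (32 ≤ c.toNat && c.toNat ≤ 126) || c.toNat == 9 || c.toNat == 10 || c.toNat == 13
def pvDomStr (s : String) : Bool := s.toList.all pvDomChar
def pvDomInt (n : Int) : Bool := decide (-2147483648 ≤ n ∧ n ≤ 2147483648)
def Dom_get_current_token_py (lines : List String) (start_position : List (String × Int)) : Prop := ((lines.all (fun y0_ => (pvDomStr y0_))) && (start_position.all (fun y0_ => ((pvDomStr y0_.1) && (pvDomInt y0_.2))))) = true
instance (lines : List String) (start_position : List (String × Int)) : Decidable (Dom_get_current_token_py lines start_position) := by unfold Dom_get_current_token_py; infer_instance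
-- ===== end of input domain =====

-- B replaces A's manual char-by-char while loop with per-delimiter str.find scans plus min
-- (alternative decomposition, not claimed faster).


-- ===== PORT A =====
-- A's while loop: advance character while in range and the char is not one of " ", ":", ",", "\n"
def pvScanA (s : List Char) (c : Int) : Int :=
  if _h : c < (s.length : Int) then
    match _hg : PySem.List.pyGet? s c with
    | some ch =>
      if ch = ' ' ∨ ch = ':' ∨ ch = ',' ∨ ch = '\n' then c
      else pvScanA s (c + 1)
    | none => c   -- Python raises IndexError here (reachable only for c < -len(s), outside Pre_)
  else c
termination_by ((s.length : Int) - c).toNat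
decreasing_by omega

def get_current_token_py (lines : List String) (start_position : List (String × Int)) : String × (List (String × List (String × Int))) :=
  match (PySem.Dict.mk start_position).get? "line", (PySem.Dict.mk start_position).get? "character" with
  | some line, some start_character =>
    match PySem.List.pyGet? lines line with
    | none =>
      -- line does not exist
      ("", [("start", start_position), ("end", start_position)])
    | some current_line =>
      let character := pvScanA current_line.toList start_character
      (PySem.Str.slice current_line (some start_character) (some character),
       [("start", start_position), ("end", [("line", line), ("character", character)])])
  | _, _ => ("", [])   -- Python raises KeyError (missing 'line'/'character'), outside Pre_

-- ===== PORT B =====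
def get_current_token_py_alt (lines : List String) (start_position : List (String × Int)) : String × (List (String × List (String × Int))) :=
  match (PySem.Dict.mk start_position).get? "line" with
  | none => ("", [])   -- Python raises KeyError, outside Pre_
  | some line =>
  match (PySem.Dict.mk start_position).get? "character" with
  | none => ("", [])   -- Python raises KeyError, outside Pre_
  | some start =>
  match PySem.List.pyGet? lines line with
  | none =>
      -- line does not exist
      ("", [("start", start_position), ("end", start_position)])
  | some current_line =>
      let hits := ((" :,\n".toList.map (fun d => PySem.Chars.findFrom current_line.toList [d] start none)).filter (fun p => p ≠ -1))
      let e := match PySem.List.min? hits (fun p => p) with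
               | some m => m
               | none => max (PySem.Str.len current_line) start
      (PySem.Str.slice current_line (some start) (some e),
       [("start", start_position), ("end", [("line", line), ("character", e)])])

-- ===== PRECONDITION & SPEC =====
-- Pre_ excludes start positions without the 'line'/'character' keys (Python raises KeyError) and
-- negative 'character' values — outside the natural LSP domain of nonnegative cursor positions,
-- where A either raises IndexError (character < -len(line)) or scans by negative-index wraparound,
-- an artefact of A's implementation.
def Pre_get_current_token_py (lines : List String) (start_position : List (String × Int)) : Prop :=
  ((PySem.Dict.mk start_position).get? "line").isSome = true ∧
  0 ≤ ((PySem.Dict.mk start_position).get? "character").getD (-1)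
instance (lines : List String) (start_position : List (String × Int)) : Decidable (Pre_get_current_token_py lines start_position) := by unfold Pre_get_current_token_py; infer_instance

def pvWitness_get_current_token_py : List String × (List (String × Int)) :=
  (["mode: attract, x"], [("line", 0), ("character", 6)])

def Spec_get_current_token_py (lines : List String) (start_position : List (String × Int)) (out : String × (List (String × List (String × Int)))) : Prop := out = get_current_token_py_alt lines start_position
instance (lines : List String) (start_position : List (String × Int)) (out : String × (List (String × List (String × Int)))) : Decidable (Spec_get_current_token_py lines start_position out) := by unfold Spec_get_current_token_py; infer_instance

-- ===== CLAIM (what is proved, stated in full; the proofs are below) =====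
def Claim_equal_get_current_token_py : Prop := ∀ (lines : List String) (start_position : List (String × Int)), Dom_get_current_token_py lines start_position → Pre_get_current_token_py lines start_position → Spec_get_current_token_py lines start_position (get_current_token_py lines start_position)

-- ===== LEMMAS AND PROOFS =====

def pvIsDelim (c : Char) : Bool := decide (c = ' ' ∨ c = ':' ∨ c = ',' ∨ c = '\n')

theorem pvScanA_step (s : List Char) (ch : Char) (c : Int) (h : c < (s.length : Int))
    (hg : PySem.List.pyGet? s c = some ch) :
    pvScanA s c = if ch = ' ' ∨ ch = ':' ∨ ch = ',' ∨ ch = '\n' then c else pvScanA s (c + 1) := by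
  rw [pvScanA, dif_pos h]
  split
  · rename_i ch2 hg2
    rw [hg] at hg2
    injection hg2 with e
    rw [e]
  · rename_i hg2
    rw [hg] at hg2
    simp at hg2

-- A's scan lands at start + index of the first delimiter at or after the cursor
theorem pvScanA_eq (s : List Char) (c : Int) (hc : 0 ≤ c) :
    pvScanA s c = c + ((s.drop c.toNat).findIdx pvIsDelim : Int) := by
  induction c using pvScanA.induct s with
  | case1 c h ch hg hd =>
    have hlt : c.toNat < s.length := by omega
    have hch : s[c.toNat] = ch := by
      rw [PySem.List.pyGet?_eq_some_getElem s hc (by exact_mod_cast h)] at hg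
      exact Option.some.inj hg
    rw [pvScanA_step s ch c h hg, if_pos hd]
    rw [List.drop_eq_getElem_cons hlt, List.findIdx_cons]
    have : pvIsDelim s[c.toNat] = true := by simp [pvIsDelim, hch, hd]
    simp [this]
  | case2 c h ch hg hd ih =>
    have hlt : c.toNat < s.length := by omega
    have hch : s[c.toNat] = ch := by
      rw [PySem.List.pyGet?_eq_some_getElem s hc (by exact_mod_cast h)] at hg
      exact Option.some.inj hg
    rw [pvScanA_step s ch c h hg, if_neg hd]
    rw [ih (by omega)]
    rw [List.drop_eq_getElem_cons hlt, List.findIdx_cons]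
    have : pvIsDelim s[c.toNat] = false := by
      simp only [pvIsDelim, hch]
      simpa using hd
    rw [this]
    have : (c + 1).toNat = c.toNat + 1 := by omega
    rw [this]
    simp only [cond_false]
    push_cast
    ring
  | case3 c h hg =>
    rw [PySem.List.pyGet?_eq_none_iff] at hg
    exact absurd (by simp [PySem.Raise.InRange]; omega) hg
  | case4 c h =>
    rw [pvScanA]
    simp only [dif_neg h]
    rw [List.drop_eq_nil_of_le (by omega), List.findIdx_nil]
    simp

-- findFrom returns -1 when the start is past the end of the string
theorem pvFindFrom_big (s sub : List Char) (c : Int) (hc : 0 ≤ c) (h : (s.length : Int) < c) :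
    PySem.Chars.findFrom s sub c none = -1 := by
  simp only [PySem.Chars.findFrom]
  rw [if_neg (by omega : ¬ c < 0), if_pos h]

-- a singleton list is a prefix of l.drop i exactly when l[i] is that character
theorem pvPrefix_drop_iff (d : Char) (l : List Char) (i : Nat) (hi : i < l.length) :
    ([d] <+: l.drop i) ↔ l[i] = d := by
  rw [List.drop_eq_getElem_cons hi]
  constructor
  · intro h
    exact (List.cons_prefix_cons.mp h).1.symm
  · intro h
    exact List.cons_prefix_cons.mpr ⟨h.symm, List.nil_prefix⟩

-- a found index of a delimiter is at least the first-delimiter index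
theorem pvFind_ge (l : List Char) (d : Char) (hd : pvIsDelim d = true)
    (hne : PySem.Chars.find l [d] ≠ -1) :
    ((l.findIdx pvIsDelim : Int) ≤ PySem.Chars.find l [d]) ∧ (PySem.Chars.find l [d]).toNat < l.length := by
  have h0 : 0 ≤ PySem.Chars.find l [d] := by
    have := PySem.Chars.neg_one_le_find l [d]
    omega
  obtain ⟨hp, _⟩ := PySem.Chars.find_spec h0
  have hlt : (PySem.Chars.find l [d]).toNat < l.length := by
    by_contra hge
    rw [List.drop_eq_nil_of_le (by omega)] at hp
    simp [List.prefix_nil] at hp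
  have hdl : l[(PySem.Chars.find l [d]).toNat] = d := (pvPrefix_drop_iff d l _ hlt).mp hp
  refine ⟨?_, hlt⟩
  by_contra hlt2
  have : (PySem.Chars.find l [d]).toNat < l.findIdx pvIsDelim := by omega
  have hfalse := List.not_of_lt_findIdx this
  have htrue := hd
  rw [← hdl] at htrue
  exact Bool.noConfusion (htrue.symm.trans hfalse)

-- at the first delimiter, find returns exactly that index
theorem pvFind_at (l : List Char) (hlt : l.findIdx pvIsDelim < l.length) :
    PySem.Chars.find l [l[l.findIdx pvIsDelim]] = (l.findIdx pvIsDelim : Int) := by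
  set d0 := l[l.findIdx pvIsDelim] with hd0
  have hpref : [d0] <+: l.drop (l.findIdx pvIsDelim) := (pvPrefix_drop_iff d0 l _ hlt).mpr rfl
  have hne : PySem.Chars.find l [d0] ≠ -1 := by
    rw [Ne, PySem.Chars.find_eq_neg_one_iff, not_not]
    exact (PySem.Chars.isIn_iff_infix [d0] l).mp
      ((PySem.Chars.exists_prefix_drop_iff_isIn [d0] l).mp ⟨_, hpref⟩)
  have h0 : 0 ≤ PySem.Chars.find l [d0] := by
    have := PySem.Chars.neg_one_le_find l [d0]
    omega
  obtain ⟨hp, hmin⟩ := PySem.Chars.find_spec h0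
  have hge := pvFind_ge l d0 (List.findIdx_getElem (w := hlt)) hne
  have hle : (PySem.Chars.find l [d0]).toNat ≤ l.findIdx pvIsDelim := by
    by_contra hgt
    exact hmin _ (by omega) hpref
  omega

-- B's min-of-finds computes the same endpoint
theorem pvFind_eq (s : List Char) (c : Int) (hc : 0 ≤ c) :
    (match PySem.List.min? (((" :,\n".toList.map (fun d => PySem.Chars.findFrom s [d] c none)).filter (fun p => p ≠ -1))) (fun p => p) with
     | some m => m
     | none => max (s.length : Int) c)
    = c + ((s.drop c.toNat).findIdx pvIsDelim : Int) := by
  have hD : " :,\n".toList = [' ', ':', ',', '\n'] := rfl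
  by_cases hbig : (s.length : Int) < c
  · have hfil : ((" :,\n".toList.map (fun d => PySem.Chars.findFrom s [d] c none)).filter (fun p => p ≠ -1)) = [] := by
      rw [hD]
      simp [pvFindFrom_big _ _ _ hc hbig]
    rw [hfil]
    rw [List.drop_eq_nil_of_le (by omega), List.findIdx_nil]
    have : PySem.List.min? ([] : List Int) (fun p => p) = none :=
      (PySem.List.min?_eq_none_iff _ _).mpr rfl
    rw [this]
    have hred : (match (none : Option Int) with | some m => m | none => max (s.length : Int) c) = max (s.length : Int) c := rfl
    rw [hred]
    omega
  · have hle : c ≤ (s.length : Int) := by omega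
    have hck : ((c.toNat : Nat) : Int) = c := Int.toNat_of_nonneg hc
    set l := s.drop c.toNat with hl
    set J := l.findIdx pvIsDelim with hJ
    have hFF : ∀ d : Char, PySem.Chars.findFrom s [d] c none =
        if PySem.Chars.find l [d] = -1 then -1 else c + PySem.Chars.find l [d] := by
      intro d
      rw [← hck, PySem.Chars.findFrom_natCast s [d] c.toNat (by omega)]
    by_cases hdel : ∃ x ∈ l, pvIsDelim x = true
    · have hJlt : J < l.length := List.findIdx_lt_length.mpr hdel
      have hJd : pvIsDelim l[J] = true := List.findIdx_getElem (w := hJlt)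
      have hd0D : l[J] ∈ [' ', ':', ',', '\n'] := by
        have : l[J] = ' ' ∨ l[J] = ':' ∨ l[J] = ',' ∨ l[J] = '\n' := by
          simpa [pvIsDelim] using hJd
        simpa using this
      have hf0 : PySem.Chars.find l [l[J]] = (J : Int) := pvFind_at l hJlt
      set hits := ((" :,\n".toList.map (fun d => PySem.Chars.findFrom s [d] c none)).filter (fun p => p ≠ -1)) with hhits
      have hmem : (c + (J : Int)) ∈ hits := by
        rw [hhits, List.mem_filter]
        constructor
        · apply List.mem_map.mpr
          refine ⟨l[J], by rw [hD]; exact hd0D, ?_⟩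
          rw [hFF, hf0, if_neg (by omega)]
        · simp only [decide_eq_true_eq]
          omega
      have hlb : ∀ x ∈ hits, c + (J : Int) ≤ x := by
        intro x hx
        rw [hhits, List.mem_filter] at hx
        obtain ⟨hxm, hxne⟩ := hx
        obtain ⟨d, hdD, hdx⟩ := List.mem_map.mp hxm
        rw [hFF] at hdx
        simp only [decide_eq_true_eq] at hxne
        by_cases hfne : PySem.Chars.find l [d] = -1
        · rw [if_pos hfne] at hdx
          exact absurd hdx.symm hxne
        · rw [if_neg hfne] at hdx
          have hdd : pvIsDelim d = true := by
            rw [hD] at hdD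
            have hdD' : d = ' ' ∨ d = ':' ∨ d = ',' ∨ d = '\n' := by simpa using hdD
            simpa [pvIsDelim] using hdD'
          have := (pvFind_ge l d hdd hfne).1
          omega
      cases hmin : PySem.List.min? hits (fun p => p) with
      | none =>
        rw [PySem.List.min?_eq_none_iff] at hmin
        rw [hmin] at hmem
        exact absurd hmem (List.not_mem_nil)
      | some m =>
        have h1 := PySem.List.min?_isMin hmin _ hmem
        have h2 := hlb _ (PySem.List.min?_mem hmin)
        simp only
        omega
    · have hall : ∀ x ∈ l, pvIsDelim x = false := by
        intro x hx
        by_contra hb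
        exact hdel ⟨x, hx, by simpa using hb⟩
      have hJlen : J = l.length := List.findIdx_eq_length.mpr hall
      have hfil : ((" :,\n".toList.map (fun d => PySem.Chars.findFrom s [d] c none)).filter (fun p => p ≠ -1)) = [] := by
        rw [hD]
        have hnone : ∀ d : Char, pvIsDelim d = true → PySem.Chars.find l [d] = -1 := by
          intro d hd
          rw [PySem.Chars.find_eq_neg_one_iff]
          intro hinf
          have : d ∈ l := hinf.subset (by simp)
          rw [hall d this] at hd
          exact Bool.false_ne_true hd
        simp only [List.map_cons, List.map_nil, hFF]
        rw [hnone ' ' (by simp [pvIsDelim]), hnone ':' (by simp [pvIsDelim]),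
            hnone ',' (by simp [pvIsDelim]), hnone '\n' (by simp [pvIsDelim])]
        simp
      rw [hfil]
      have : PySem.List.min? ([] : List Int) (fun p => p) = none :=
        (PySem.List.min?_eq_none_iff _ _).mpr rfl
      rw [this]
      have hred : (match (none : Option Int) with | some m => m | none => max (s.length : Int) c) = max (s.length : Int) c := rfl
      rw [hred]
      have hlen : l.length = s.length - c.toNat := by rw [hl, List.length_drop]
      omega

-- ===== VERDICT (by name: the statement is the Claim_ definition above) =====
theorem get_current_token_py_spec : Claim_equal_get_current_token_py := by
  intro lines sp _hdom hpre
  unfold Spec_get_current_token_py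
  unfold get_current_token_py get_current_token_py_alt
  obtain ⟨h1, h2⟩ := hpre
  cases hl : (PySem.Dict.mk sp).get? "line" with
  | none => simp [hl] at h1
  | some line =>
  cases hc : (PySem.Dict.mk sp).get? "character" with
  | none => simp [hc] at h2
  | some start =>
  simp only
  cases hline : PySem.List.pyGet? lines line with
  | none => rfl
  | some cur =>
  simp only
  rw [hc] at h2
  simp only [Option.getD_some] at h2
  have he := pvFind_eq cur.toList start h2
  have hs := pvScanA_eq cur.toList start h2
  simp only [PySem.Str.len_eq] at he ⊢
  rw [hs, ← he]
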